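-- pv_equiv track=rewrite | github.com/Agentic-Environmental-Engineering/GymVerse | gem/gem/envs/RLVE/max_different_group_pair_division_env.py | _evaluate_splits
-- ===== SOURCE A (Python) =====
-- from typing import Any, Optional, SupportsFloat, Tuple, List
--
-- def _evaluate_splits(A: List[int], splits: List[int]) -> Tuple[bool, int]:
--     """
--     Evaluate the provided sequence of splits.
--     Returns (valid, score). If invalid, score may be 0 or partial.
--     """
--     N = len(A)
--     block_id = 0
--     block_numbers = [0] * N
--     score = 0
--
--     for i in splits:
--         # Basic index checks
--         if not (0 <= i < N):
--             return False, 0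
--         if not (0 <= (i + 1) < N):
--             return False, 0
--         # Must split within the same current block
--         if block_numbers[i] != block_numbers[i + 1]:
--             return False, 0
--
--         # Sum for the left part (ending at i)
--         sum1 = 0
--         j = i
--         while j >= 0:
--             if block_numbers[j] != block_numbers[i]:
--                 break
--             sum1 += A[j]
--             j -= 1
--
--         # Create a new block id for the right part and sum it
--         block_id += 1
--         sum2 = 0
--         j = i + 1
--         while j < N:
--             if block_numbers[j] != block_numbers[i]:
--                 break
--             sum2 += A[j]
--             block_numbers[j] = block_id
--             j += 1
--
--         score += sum1 * sum2
--
--     return True, score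
-- ===== SOURCE B (Python) =====
-- def _evaluate_splits(A, splits):
--     """Prefix sums + set of block-start cut positions: validity = the new cut
--     position is in range and unused; each block sum is a prefix-sum difference
--     between the neighbouring cuts, so no per-element labelling or summing."""
--     N = len(A)
--     P = [0] * (N + 1)
--     for k in range(N):
--         P[k + 1] = P[k] + A[k]
--     cuts = set()
--     score = 0
--     for i in splits:
--         c = i + 1
--         if not (0 <= i and c < N):
--             return False, 0
--         if c in cuts:
--             return False, 0
--         L = 0
--         R = N
--         for x in cuts:
--             if x <= i and L < x:
--                 L = x
--             if i < x and x < R: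
--                 R = x
--         score += (P[c] - P[L]) * (P[R] - P[c])
--         cuts.add(c)
--     return True, score
-- ===== Notes on version B (the rewrite author's own statement) =====
-- stated objective: alternative
-- what changed: B replaces A's per-element block-label array and its two per-split summation/relabelling scans by a prefix-sum table and a set of block-boundary cut positions: a split is valid iff its cut position is in range and unused, and each left/right block sum is a difference of two prefix sums at the neighbouring cuts.
import Mathlib
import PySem

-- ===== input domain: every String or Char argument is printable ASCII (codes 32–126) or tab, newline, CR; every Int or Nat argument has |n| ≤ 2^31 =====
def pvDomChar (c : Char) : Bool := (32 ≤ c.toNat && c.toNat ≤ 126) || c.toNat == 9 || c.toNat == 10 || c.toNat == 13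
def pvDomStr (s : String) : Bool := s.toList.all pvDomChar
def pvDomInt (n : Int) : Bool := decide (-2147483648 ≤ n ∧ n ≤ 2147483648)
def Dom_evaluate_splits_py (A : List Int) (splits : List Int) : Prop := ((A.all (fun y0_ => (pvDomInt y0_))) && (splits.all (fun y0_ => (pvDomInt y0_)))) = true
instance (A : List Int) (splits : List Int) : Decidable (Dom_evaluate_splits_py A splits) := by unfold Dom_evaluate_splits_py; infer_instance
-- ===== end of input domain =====

-- B replaces A's per-element block labelling and per-split summation loops by prefix
-- sums and a set of block-boundary cut positions (objective: alternative algorithm).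

-- ===== PORT A =====
-- sum1 loop: j runs from i down while block_numbers[j] == block_numbers[i]
def aLeft (Aa bn : List Int) (i j : Int) : Int :=
  if _h : 0 ≤ j then
    if PySem.List.pyGetD bn j 0 ≠ PySem.List.pyGetD bn i 0 then 0
    else PySem.List.pyGetD Aa j 0 + aLeft Aa bn i (j - 1)
  else 0
  termination_by (j + 1).toNat
  decreasing_by omega

-- sum2 loop: j runs from i+1 up while in the same block; relabels with block_id
def aRight (Aa : List Int) (i bid N : Int) (j : Int) (bn : List Int) : Int × List Int :=
  if _h : j < N then
    if PySem.List.pyGetD bn j 0 ≠ PySem.List.pyGetD bn i 0 then (0, bn)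
    else
      let r := aRight Aa i bid N (j + 1) (PySem.List.pySetD bn j bid)
      (PySem.List.pyGetD Aa j 0 + r.1, r.2)
  else (0, bn)
  termination_by (N - j).toNat
  decreasing_by omega

-- one iteration of A's 'for i in splits' loop; none = an early 'return False, 0'
def aStep (Aa : List Int) (st : Option (List Int × Int × Int)) (i : Int) :
    Option (List Int × Int × Int) :=
  match st with
  | none => none
  | some (bn, bid, score) =>
    let N : Int := Aa.length
    if ¬ (0 ≤ i ∧ i < N) then none
    else if ¬ (0 ≤ i + 1 ∧ i + 1 < N) then none
    else if PySem.List.pyGetD bn i 0 ≠ PySem.List.pyGetD bn (i + 1) 0 then none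
    else
      let sum1 := aLeft Aa bn i i
      let bid' := bid + 1
      let r := aRight Aa i bid' Aa.length (i + 1) bn
      some (r.2, bid', score + sum1 * r.1)

def evaluate_splits_py (A : List Int) (splits : List Int) : Bool × Int :=
  match splits.foldl (aStep A) (some (List.replicate A.length 0, 0, 0)) with
  | some (_, _, s) => (true, s)
  | none => (false, 0)

-- ===== PORT B =====
-- prefix-sum table P with P[k] = A[0]+…+A[k-1], built by Source B's loop
def bPrefix (Aa : List Int) : List Int :=
  (Aa.foldl (fun ps a => (ps.1 ++ [ps.2 + a], ps.2 + a)) (([0] : List Int), (0 : Int))).1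

-- one iteration of B's loop; none = an early 'return False, 0'
def bStep (P : List Int) (N : Int) (st : Option (PySem.Set Int × Int)) (i : Int) :
    Option (PySem.Set Int × Int) :=
  match st with
  | none => none
  | some (cuts, score) =>
    let c := i + 1
    if ¬ (0 ≤ i ∧ c < N) then none
    else if PySem.Set.contains cuts c then none
    else
      let lr := cuts.foldl
        (fun (lr : Int × Int) x =>
          (if x ≤ i ∧ lr.1 < x then x else lr.1, if i < x ∧ x < lr.2 then x else lr.2))
        (0, N)
      some (PySem.Set.add cuts c,
        score + (PySem.List.pyGetD P c 0 - PySem.List.pyGetD P lr.1 0) *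
                (PySem.List.pyGetD P lr.2 0 - PySem.List.pyGetD P c 0))

def evaluate_splits_py_alt (A : List Int) (splits : List Int) : Bool × Int :=
  match splits.foldl (bStep (bPrefix A) A.length) (some ((PySem.Set.ofList [] : PySem.Set Int), 0)) with
  | some (_, s) => (true, s)
  | none => (false, 0)

-- ===== PRECONDITION & SPEC =====
def Spec_evaluate_splits_py (A : List Int) (splits : List Int) (out : Bool × Int) : Prop := out = evaluate_splits_py_alt A splits
instance (A : List Int) (splits : List Int) (out : Bool × Int) : Decidable (Spec_evaluate_splits_py A splits out) := by unfold Spec_evaluate_splits_py; infer_instance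

-- ===== CLAIM (what is proved, stated in full; the proofs are below) =====
def Claim_equal_evaluate_splits_py : Prop := ∀ (A : List Int) (splits : List Int), Dom_evaluate_splits_py A splits → Spec_evaluate_splits_py A splits (evaluate_splits_py A splits)

-- ===== LEMMAS AND PROOFS =====

-- take-prefix sum of A up to Int index k
def pvS (Aa : List Int) (k : Int) : Int := (Aa.take k.toNat).sum

-- the largest cut ≤ i (0 if none), as B's fold computes it
def startOf (cuts : List Int) (i : Int) : Int :=
  cuts.foldl (fun L x => if x ≤ i ∧ L < x then x else L) 0

-- the smallest cut > i (default N), as B's fold computes it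
def endOf (cuts : List Int) (i N : Int) : Int :=
  cuts.foldl (fun R x => if i < x ∧ x < R then x else R) N

-- simulation invariant: cuts determine A's block labels up to the ↔ below
def InvP (Aa cuts bn : List Int) (bid : Int) : Prop :=
  bn.length = Aa.length ∧
  (∀ x ∈ cuts, 1 ≤ x ∧ x < (Aa.length : Int)) ∧
  (∀ j : Int, 0 ≤ j → j < (Aa.length : Int) → PySem.List.pyGetD bn j 0 ≤ bid) ∧
  (∀ j k : Int, 0 ≤ j → j < (Aa.length : Int) → 0 ≤ k → k < (Aa.length : Int) →
    (PySem.List.pyGetD bn j 0 = PySem.List.pyGetD bn k 0 ↔ startOf cuts j = startOf cuts k))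

def RelP (Aa : List Int) (stA : Option (List Int × Int × Int))
    (stB : Option (PySem.Set Int × Int)) : Prop :=
  (stA = none ∧ stB = none) ∨
  (∃ bn bid sc cuts, stA = some (bn, bid, sc) ∧ stB = some (cuts, sc) ∧ InvP Aa cuts bn bid)

lemma foldMax_spec (i : Int) : ∀ (cuts : List Int) (L0 : Int),
    (cuts.foldl (fun L x => if x ≤ i ∧ L < x then x else L) L0 = L0 ∨
      (cuts.foldl (fun L x => if x ≤ i ∧ L < x then x else L) L0 ∈ cuts ∧
       cuts.foldl (fun L x => if x ≤ i ∧ L < x then x else L) L0 ≤ i)) ∧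
    L0 ≤ cuts.foldl (fun L x => if x ≤ i ∧ L < x then x else L) L0 ∧
    (∀ x ∈ cuts, x ≤ i → x ≤ cuts.foldl (fun L x => if x ≤ i ∧ L < x then x else L) L0) := by
  intro cuts
  induction cuts with
  | nil => simp
  | cons c rest ih =>
    intro L0
    simp only [List.foldl_cons, List.mem_cons]
    obtain ⟨h1, h2, h3⟩ := ih (if c ≤ i ∧ L0 < c then c else L0)
    refine ⟨?_, ?_, ?_⟩
    · rcases h1 with h | ⟨hm, hi⟩
      · rw [h]; split_ifs with hc
        · exact Or.inr ⟨Or.inl rfl, hc.1⟩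
        · exact Or.inl rfl
      · exact Or.inr ⟨Or.inr hm, hi⟩
    · refine le_trans ?_ h2; split_ifs with hc <;> omega
    · rintro x (rfl | hx) hxi
      · refine le_trans ?_ h2; split_ifs with hc <;> omega
      · exact h3 x hx hxi

lemma foldMin_spec (i : Int) : ∀ (cuts : List Int) (R0 : Int),
    (cuts.foldl (fun R x => if i < x ∧ x < R then x else R) R0 = R0 ∨
      (cuts.foldl (fun R x => if i < x ∧ x < R then x else R) R0 ∈ cuts ∧
       i < cuts.foldl (fun R x => if i < x ∧ x < R then x else R) R0)) ∧
    cuts.foldl (fun R x => if i < x ∧ x < R then x else R) R0 ≤ R0 ∧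
    (∀ x ∈ cuts, i < x → cuts.foldl (fun R x => if i < x ∧ x < R then x else R) R0 ≤ x) := by
  intro cuts
  induction cuts with
  | nil => simp
  | cons c rest ih =>
    intro R0
    simp only [List.foldl_cons, List.mem_cons]
    obtain ⟨h1, h2, h3⟩ := ih (if i < c ∧ c < R0 then c else R0)
    refine ⟨?_, ?_, ?_⟩
    · rcases h1 with h | ⟨hm, hi⟩
      · rw [h]; split_ifs with hc
        · exact Or.inr ⟨Or.inl rfl, hc.1⟩
        · exact Or.inl rfl
      · exact Or.inr ⟨Or.inr hm, hi⟩
    · refine le_trans h2 ?_; split_ifs with hc <;> omega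
    · rintro x (rfl | hx) hxi
      · refine le_trans h2 ?_; split_ifs with hc <;> omega
      · exact h3 x hx hxi

lemma pvS_succ (Aa : List Int) (j : Int) (h0 : 0 ≤ j) (h1 : j < (Aa.length : Int)) :
    pvS Aa (j + 1) = pvS Aa j + PySem.List.pyGetD Aa j 0 := by
  have hn : j.toNat < Aa.length := by omega
  have hj1 : (j + 1).toNat = j.toNat + 1 := by omega
  rw [pvS, pvS, hj1, List.take_add_one, List.sum_append,
    PySem.List.pyGetD_of_nonneg Aa 0 h0]
  simp [List.getD, List.getElem?_eq_getElem hn]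

lemma bfold_eq (l : List Int) : ∀ (ps : List Int) (s : Int),
    l.foldl (fun (q : List Int × Int) a => (q.1 ++ [q.2 + a], q.2 + a)) (ps, s) =
      (ps ++ (List.range l.length).map (fun k => s + (l.take (k + 1)).sum), s + l.sum) := by
  induction l with
  | nil => simp
  | cons a t ih =>
    intro ps s
    rw [List.foldl_cons, ih]
    simp only [List.length_cons, List.range_succ_eq_map, List.map_cons, List.map_map]
    simp [List.append_assoc, Function.comp, add_assoc]

lemma bPrefix_getD (Aa : List Int) (k : Int) (h0 : 0 ≤ k) (h1 : k ≤ (Aa.length : Int)) :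
    PySem.List.pyGetD (bPrefix Aa) k 0 = pvS Aa k := by
  rw [PySem.List.pyGetD_of_nonneg _ 0 h0, bPrefix, bfold_eq]
  rcases Nat.eq_zero_or_eq_succ_pred k.toNat with hz | hs
  · simp [pvS, (by omega : k.toNat = 0)]

  · have hm : k.toNat - 1 < Aa.length := by omega
    rw [List.getD, List.getElem?_append_right (by simp; omega)]
    simp only [List.length_singleton]
    rw [List.getElem?_map, List.getElem?_range (by omega : k.toNat - 1 < Aa.length)]
    simp [pvS, (by omega : k.toNat - 1 + 1 = k.toNat)]

lemma aLeft_eq (Aa bn : List Int) (i b m : Int) (hb : PySem.List.pyGetD bn i 0 = b)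
    (hm0 : 0 ≤ m) (hiN : i < (Aa.length : Int))
    (hblock : ∀ j : Int, m ≤ j → j ≤ i → PySem.List.pyGetD bn j 0 = b)
    (hstop : m = 0 ∨ PySem.List.pyGetD bn (m - 1) 0 ≠ b) :
    ∀ j : Int, m - 1 ≤ j → j ≤ i → aLeft Aa bn i j = pvS Aa (j + 1) - pvS Aa m := by
  intro j
  induction hn : (j + 1).toNat generalizing j with
  | zero =>
    intro hmj hji
    have hj : j = -1 := by omega
    subst hj
    have hm : m = 0 := by omega
    rw [aLeft, dif_neg (by omega)]
    simp [hm, pvS]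
  | succ n ih =>
    intro hmj hji
    have h0j : 0 ≤ j := by omega
    rw [aLeft, dif_pos h0j, hb]
    by_cases hjm : m ≤ j
    · have hbj : PySem.List.pyGetD bn j 0 = b := hblock j hjm hji
      rw [if_neg (by simp [hbj]), ih (j - 1) (by omega) (by omega) (by omega)]
      have e1 : j - 1 + 1 = j := by ring
      rw [e1, pvS_succ Aa j h0j (by omega)]
      ring
    · have hj : j = m - 1 := by omega
      subst hj
      rcases hstop with hm | hne
      · omega
      · rw [if_pos hne]
        have e1 : m - 1 + 1 = m := by ring
        rw [e1]
        ring

lemma pyGetD_set (bn : List Int) (jn v k : Int) (hj0 : 0 ≤ jn) (hk0 : 0 ≤ k)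
    (hjl : jn < (bn.length : Int)) :
    PySem.List.pyGetD (PySem.List.pySetD bn jn v) k 0 =
      if k = jn then v else PySem.List.pyGetD bn k 0 := by
  rw [PySem.List.pySetD_of_nonneg _ v hj0, PySem.List.pyGetD_of_nonneg _ 0 hk0,
    PySem.List.pyGetD_of_nonneg _ 0 hk0]
  rw [List.getD, List.getD, List.getElem?_set]
  by_cases h : k = jn
  · subst h
    rw [if_pos rfl, if_pos rfl, if_pos (by omega : k.toNat < bn.length)]
    rfl
  · rw [if_neg h, if_neg (by omega : ¬ jn.toNat = k.toNat)]

lemma aRight_eq (Aa : List Int) (i bid R b : Int)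
    (hi : 0 ≤ i) (hR : R ≤ (Aa.length : Int)) :
    ∀ (n : Nat) (j : Int) (bn : List Int), (R - j).toNat = n →
    bn.length = Aa.length → PySem.List.pyGetD bn i 0 = b → i < j → j ≤ R →
    (∀ k : Int, j ≤ k → k < R → PySem.List.pyGetD bn k 0 = b) →
    (R = (Aa.length : Int) ∨ PySem.List.pyGetD bn R 0 ≠ b) →
    (aRight Aa i bid Aa.length j bn).1 = pvS Aa R - pvS Aa j ∧
    (aRight Aa i bid Aa.length j bn).2.length = bn.length ∧
    (∀ k : Int, 0 ≤ k →
      PySem.List.pyGetD (aRight Aa i bid Aa.length j bn).2 k 0 =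
        if j ≤ k ∧ k < R then bid else PySem.List.pyGetD bn k 0) := by
  intro n
  induction n with
  | zero =>
    intro j bn hn hlen hbi hij hjR hblock hstop
    have hjR' : j = R := by omega
    subst hjR'
    rw [aRight]
    rcases hstop with hRN | hne
    · rw [dif_neg (by omega)]
      exact ⟨by omega, rfl, fun k hk => by rw [if_neg (by omega)]⟩
    · by_cases hjN : j < (Aa.length : Int)
      · rw [dif_pos hjN, if_pos (by rw [hbi]; exact hne)]
        exact ⟨by omega, rfl, fun k hk => by rw [if_neg (by omega)]⟩
      · rw [dif_neg hjN]
        exact ⟨by omega, rfl, fun k hk => by rw [if_neg (by omega)]⟩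
  | succ n ih =>
    intro j bn hn hlen hbi hij hjR hblock hstop
    have hjR' : j < R := by omega
    have hjN : j < (Aa.length : Int) := by omega
    have hj0 : 0 ≤ j := by omega
    have hbj : PySem.List.pyGetD bn j 0 = b := hblock j le_rfl hjR'
    rw [aRight, dif_pos hjN, if_neg (by rw [hbi, hbj]; simp)]
    have hjbn : j < (bn.length : Int) := by omega
    obtain ⟨ih1, ih2, ih3⟩ := ih (j + 1) (PySem.List.pySetD bn j bid)
      (by omega)
      (by rw [PySem.List.length_pySetD]; exact hlen)
      (by rw [pyGetD_set bn j bid i hj0 hi hjbn, if_neg (by omega)]; exact hbi)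
      (by omega) (by omega)
      (fun k hk1 hk2 => by
        rw [pyGetD_set bn j bid k hj0 (by omega) hjbn, if_neg (by omega)]
        exact hblock k (by omega) hk2)
      (by
        rcases hstop with hRN | hne
        · exact Or.inl hRN
        · refine Or.inr ?_
          rw [pyGetD_set bn j bid R hj0 (by omega) hjbn, if_neg (by omega)]
          exact hne)
    refine ⟨?_, ?_, ?_⟩
    · show PySem.List.pyGetD Aa j 0 + (aRight Aa i bid ↑Aa.length (j + 1) (PySem.List.pySetD bn j bid)).1 = _
      rw [ih1, pvS_succ Aa j hj0 hjN]
      ring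
    · show (aRight Aa i bid ↑Aa.length (j + 1) (PySem.List.pySetD bn j bid)).2.length = _
      rw [ih2, PySem.List.length_pySetD]
    · intro k hk0
      show PySem.List.pyGetD (aRight Aa i bid ↑Aa.length (j + 1) (PySem.List.pySetD bn j bid)).2 k 0 = _
      rw [ih3 k hk0, pyGetD_set bn j bid k hj0 hk0 hjbn]
      split_ifs <;> first | rfl | omega

lemma startOf_cases (cuts : List Int) (i : Int) :
    startOf cuts i = 0 ∨ (startOf cuts i ∈ cuts ∧ startOf cuts i ≤ i) :=
  (foldMax_spec i cuts 0).1

lemma startOf_nonneg (cuts : List Int) (i : Int) : 0 ≤ startOf cuts i :=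
  (foldMax_spec i cuts 0).2.1

lemma startOf_ub (cuts : List Int) (i x : Int) (hx : x ∈ cuts) (hxi : x ≤ i) :
    x ≤ startOf cuts i :=
  (foldMax_spec i cuts 0).2.2 x hx hxi

lemma startOf_le (cuts : List Int) (i : Int) (h : 0 ≤ i) : startOf cuts i ≤ i := by
  rcases startOf_cases cuts i with h0 | ⟨_, hle⟩ <;> omega

lemma startOf_mono (cuts : List Int) (j k : Int) (h : j ≤ k) :
    startOf cuts j ≤ startOf cuts k := by
  rcases startOf_cases cuts j with h0 | ⟨hm, hle⟩
  · rw [h0]; exact startOf_nonneg cuts k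
  · exact startOf_ub cuts k _ hm (by omega)

lemma startOf_interval (cuts : List Int) (i j : Int)
    (h1 : startOf cuts i ≤ j) (h2 : j ≤ i) : startOf cuts j = startOf cuts i := by
  refine le_antisymm (startOf_mono cuts j i h2) ?_
  rcases startOf_cases cuts i with h0 | ⟨hm, _⟩
  · rw [h0]; exact startOf_nonneg cuts j
  · exact startOf_ub cuts j _ hm h1

lemma endOf_cases (cuts : List Int) (i N : Int) :
    endOf cuts i N = N ∨ (endOf cuts i N ∈ cuts ∧ i < endOf cuts i N) :=
  (foldMin_spec i cuts N).1

lemma endOf_le (cuts : List Int) (i N : Int) : endOf cuts i N ≤ N :=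
  (foldMin_spec i cuts N).2.1

lemma endOf_lb (cuts : List Int) (i N x : Int) (hx : x ∈ cuts) (hxi : i < x) :
    endOf cuts i N ≤ x :=
  (foldMin_spec i cuts N).2.2 x hx hxi

lemma endOf_gt (cuts : List Int) (i N : Int) (h : i < N) : i < endOf cuts i N := by
  rcases endOf_cases cuts i N with h0 | ⟨_, hlt⟩ <;> omega

-- inside the block of i (up to the next cut) every position has the same start
lemma startOf_inside (cuts : List Int) (i N k : Int) (_h0 : 0 ≤ i)
    (hik : i ≤ k) (hkR : k < endOf cuts i N) : startOf cuts k = startOf cuts i := by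
  refine le_antisymm ?_ (startOf_mono cuts i k hik)
  rcases startOf_cases cuts k with hc | ⟨hm, hle⟩
  · rw [hc]; exact startOf_nonneg cuts i
  · by_cases hgt : i < startOf cuts k
    · exact absurd (endOf_lb cuts i N _ hm hgt) (by omega)
    · exact startOf_ub cuts i _ hm (by omega)

lemma startOf_append (cuts : List Int) (c j : Int) :
    startOf (cuts ++ [c]) j =
      if c ≤ j ∧ startOf cuts j < c then c else startOf cuts j := by
  simp [startOf, List.foldl_append]

-- i+1 is a fresh cut iff the labels of i and i+1 agree
lemma startOf_succ_eq (cuts : List Int) (i : Int) (h0 : 0 ≤ i) :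
    startOf cuts i = startOf cuts (i + 1) ↔ (i + 1) ∉ cuts := by
  constructor
  · intro h hc
    have := startOf_ub cuts (i + 1) (i + 1) hc le_rfl
    have := startOf_le cuts i h0
    omega
  · intro hc
    refine le_antisymm (startOf_mono cuts i (i + 1) (by omega)) ?_
    rcases startOf_cases cuts (i + 1) with h | ⟨hm, hle⟩
    · rw [h]; exact startOf_nonneg cuts i
    · exact startOf_ub cuts i _ hm (by
        rcases eq_or_lt_of_le hle with h | h
        · exact absurd (h ▸ hm) hc
        · omega)

lemma step_rel (Aa cuts bn : List Int) (bid sc : Int) (hInv : InvP Aa cuts bn bid) (i : Int) :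
    RelP Aa (aStep Aa (some (bn, bid, sc)) i)
      (bStep (bPrefix Aa) (Aa.length : Int) (some (cuts, sc)) i) := by
  obtain ⟨hlen, hcuts, hbound, hiff⟩ := hInv
  by_cases hA1 : 0 ≤ i ∧ i + 1 < (Aa.length : Int)
  case neg =>
    left
    constructor
    · simp only [aStep]
      by_cases h1 : 0 ≤ i ∧ i < (Aa.length : Int)
      · rw [if_neg (not_not_intro h1), if_pos (by omega)]
      · rw [if_pos h1]
    · simp only [bStep]
      rw [if_pos (by omega)]
  case pos =>
    obtain ⟨hi0, hiN1⟩ := hA1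
    have hiN : i < (Aa.length : Int) := by omega
    by_cases hmem : (i + 1) ∈ cuts
    · -- invalid split: i+1 is already a cut / labels differ
      have hne : PySem.List.pyGetD bn i 0 ≠ PySem.List.pyGetD bn (i + 1) 0 := by
        intro he
        exact ((startOf_succ_eq cuts i hi0).mp
          ((hiff i (i + 1) hi0 hiN (by omega) hiN1).mp he)) hmem
      left
      constructor
      · simp only [aStep]
        rw [if_neg (not_not_intro ⟨hi0, hiN⟩), if_neg (not_not_intro ⟨by omega, hiN1⟩),
          if_pos hne]
      · simp only [bStep]
        rw [if_neg (not_not_intro ⟨hi0, hiN1⟩),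
          if_pos (by simpa [PySem.Set.contains, List.contains_iff_mem] using hmem)]
    · -- valid split
      have hco : ¬ (PySem.Set.contains cuts (i + 1) = true) := by
        simpa [PySem.Set.contains, List.contains_iff_mem] using hmem
      have hstart : startOf cuts i = startOf cuts (i + 1) :=
        (startOf_succ_eq cuts i hi0).mpr hmem
      have heq : PySem.List.pyGetD bn i 0 = PySem.List.pyGetD bn (i + 1) 0 :=
        (hiff i (i + 1) hi0 hiN (by omega) hiN1).mpr hstart
      have hL0 : 0 ≤ startOf cuts i := startOf_nonneg cuts i
      have hLi : startOf cuts i ≤ i := startOf_le cuts i hi0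
      have hiR : i < endOf cuts i (Aa.length : Int) := endOf_gt cuts i _ hiN
      have hRN : endOf cuts i (Aa.length : Int) ≤ (Aa.length : Int) := endOf_le cuts i _
      have hsum1 : aLeft Aa bn i i =
          pvS Aa (i + 1) - pvS Aa (startOf cuts i) := by
        refine aLeft_eq Aa bn i (PySem.List.pyGetD bn i 0) (startOf cuts i) rfl hL0 hiN
          ?_ ?_ i (by omega) le_rfl
        · intro j h1 h2
          exact (hiff j i (by omega) (by omega) hi0 hiN).mpr
            (startOf_interval cuts i j h1 h2)
        · rcases startOf_cases cuts i with h0 | ⟨hm, _⟩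
          · exact Or.inl h0
          · refine Or.inr fun he => ?_
            have hb1 : 1 ≤ startOf cuts i := (hcuts _ hm).1
            have := (hiff (startOf cuts i - 1) i (by omega) (by omega) hi0 hiN).mp he
            have := startOf_le cuts (startOf cuts i - 1) (by omega)
            omega
      obtain ⟨h1, h2, h3⟩ := aRight_eq Aa i (bid + 1) (endOf cuts i (Aa.length : Int))
        (PySem.List.pyGetD bn i 0) hi0 hRN
        ((endOf cuts i (Aa.length : Int) - (i + 1)).toNat) (i + 1) bn rfl hlen rfl
        (by omega) (by omega)
        (fun k hk1 hk2 =>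
          (hiff k i (by omega) (by omega) hi0 hiN).mpr
            (startOf_inside cuts i (Aa.length : Int) k hi0 (by omega) hk2))
        (by
          rcases endOf_cases cuts i (Aa.length : Int) with h0 | ⟨hm, hlt⟩
          · exact Or.inl h0
          · refine Or.inr fun he => ?_
            obtain ⟨hb1, hb2⟩ := hcuts _ hm
            have := (hiff (endOf cuts i (Aa.length : Int)) i (by omega) (by omega)
              hi0 hiN).mp he
            have := startOf_ub cuts (endOf cuts i (Aa.length : Int)) _ hm le_rfl
            omega)
      have hwin : ∀ m : Int, 0 ≤ m → m < (Aa.length : Int) →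
          ((i + 1 ≤ m ∧ m < endOf cuts i (Aa.length : Int)) ↔
           (i + 1 ≤ m ∧ startOf cuts m < i + 1)) := by
        intro m hm0 hmN
        constructor
        · rintro ⟨hc1, hc2⟩
          refine ⟨hc1, ?_⟩
          rw [startOf_inside cuts i (Aa.length : Int) m hi0 (by omega) hc2]
          omega
        · rintro ⟨hc1, hc2⟩
          refine ⟨hc1, ?_⟩
          by_contra hc
          push Not at hc
          rcases endOf_cases cuts i (Aa.length : Int) with h0 | ⟨hm', hlt⟩
          · omega
          · have := startOf_ub cuts m _ hm' (by omega)
            omega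
      right
      refine ⟨(aRight Aa i (bid + 1) (Aa.length : Int) (i + 1) bn).2, bid + 1,
        sc + (pvS Aa (i + 1) - pvS Aa (startOf cuts i)) *
          (pvS Aa (endOf cuts i (Aa.length : Int)) - pvS Aa (i + 1)),
        cuts ++ [i + 1], ?_, ?_, ?_⟩
      · simp only [aStep]
        rw [if_neg (not_not_intro ⟨hi0, hiN⟩), if_neg (not_not_intro ⟨by omega, hiN1⟩),
          if_neg (not_not_intro heq), hsum1, h1]
      · simp only [bStep]
        rw [if_neg (not_not_intro ⟨hi0, hiN1⟩), if_neg hco,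
          PySem.List.foldl_prod_mk (fun L x => if x ≤ i ∧ L < x then x else L)
            (fun R x => if i < x ∧ x < R then x else R) cuts 0 (Aa.length : Int)]
        have es : List.foldl (fun L x => if x ≤ i ∧ L < x then x else L) 0 cuts =
            startOf cuts i := rfl
        have ee : List.foldl (fun R x => if i < x ∧ x < R then x else R)
            (Aa.length : Int) cuts = endOf cuts i (Aa.length : Int) := rfl
        rw [es, ee]
        have hadd : PySem.Set.add cuts (i + 1) = cuts ++ [i + 1] := by
          simp [PySem.Set.add, PySem.Set.contains, hmem]
        rw [hadd, bPrefix_getD Aa (i + 1) (by omega) (by omega),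
          bPrefix_getD Aa (startOf cuts i) hL0 (by omega),
          bPrefix_getD Aa (endOf cuts i (Aa.length : Int)) (by omega) hRN]
      · refine ⟨by rw [h2, hlen], ?_, ?_, ?_⟩
        · intro x hx
          rcases List.mem_append.mp hx with hx | hx
          · exact hcuts x hx
          · have : x = i + 1 := by simpa using hx
            omega
        · intro j hj0 hjN
          rw [h3 j hj0]
          have := hbound j hj0 hjN
          split_ifs <;> omega
        · intro j k hj0 hjN hk0 hkN
          rw [h3 j hj0, h3 k hk0, startOf_append, startOf_append]
          by_cases cj : i + 1 ≤ j ∧ j < endOf cuts i (Aa.length : Int) <;>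
            by_cases ck : i + 1 ≤ k ∧ k < endOf cuts i (Aa.length : Int)
          · rw [if_pos cj, if_pos ck, if_pos ((hwin j hj0 hjN).mp cj),
              if_pos ((hwin k hk0 hkN).mp ck)]
            simp
          · rw [if_pos cj, if_neg ck, if_pos ((hwin j hj0 hjN).mp cj),
              if_neg (fun hc => ck ((hwin k hk0 hkN).mpr hc))]
            constructor
            · intro he
              have := hbound k hk0 hkN
              omega
            · intro he
              exfalso
              rcases startOf_cases cuts k with h0 | ⟨hm, _⟩
              · omega
              · exact hmem (he ▸ hm)
          · rw [if_neg cj, if_pos ck, if_neg (fun hc => cj ((hwin j hj0 hjN).mpr hc)),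
              if_pos ((hwin k hk0 hkN).mp ck)]
            constructor
            · intro he
              have := hbound j hj0 hjN
              omega
            · intro he
              exfalso
              rcases startOf_cases cuts j with h0 | ⟨hm, _⟩
              · omega
              · exact hmem (he.symm ▸ hm)
          · rw [if_neg cj, if_neg ck, if_neg (fun hc => cj ((hwin j hj0 hjN).mpr hc)),
              if_neg (fun hc => ck ((hwin k hk0 hkN).mpr hc))]
            exact hiff j k hj0 hjN hk0 hkN

lemma fold_rel (Aa : List Int) (splits : List Int) :
    ∀ stA stB, RelP Aa stA stB →
      RelP Aa (splits.foldl (aStep Aa) stA) (splits.foldl (bStep (bPrefix Aa) (Aa.length : Int)) stB) := by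
  intro stA stB h
  induction splits generalizing stA stB with
  | nil => exact h
  | cons i rest ih =>
    apply ih
    rcases h with ⟨hA, hB⟩ | ⟨bn, bid, sc, cuts, hA, hB, hInv⟩
    · subst hA; subst hB; exact Or.inl ⟨rfl, rfl⟩
    · subst hA; subst hB; exact step_rel Aa cuts bn bid sc hInv i

lemma init_rel (Aa : List Int) :
    RelP Aa (some (List.replicate Aa.length 0, 0, 0)) (some ((PySem.Set.ofList [] : PySem.Set Int), 0)) := by
  refine Or.inr ⟨_, 0, 0, [], rfl, rfl, by simp, by simp, ?_, ?_⟩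
  · intro j h0 h1
    rw [PySem.List.pyGetD_of_nonneg _ 0 h0]
    simp [List.getD, (by omega : j.toNat < Aa.length)]
  · intro j k hj0 hj1 hk0 hk1
    rw [PySem.List.pyGetD_of_nonneg _ 0 hj0, PySem.List.pyGetD_of_nonneg _ 0 hk0]
    simp [List.getD, (by omega : j.toNat < Aa.length),
      (by omega : k.toNat < Aa.length), startOf]

-- ===== VERDICT (by name: the statement is the Claim_ definition above) =====
theorem evaluate_splits_py_spec : Claim_equal_evaluate_splits_py := by
  intro Aa splits _
  unfold Spec_evaluate_splits_py evaluate_splits_py evaluate_splits_py_alt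
  have h := fold_rel Aa splits _ _ (init_rel Aa)
  rcases h with ⟨hA, hB⟩ | ⟨bn, bid, sc, cuts, hA, hB, _⟩ <;> rw [hA, hB]
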